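-- pv_equiv track=rewrite | github.com/plilja/puzzlesg | py3/zagrade/zagrade.py | f
-- ===== SOURCE A (Python) =====
-- def f(inp):
--     def g(inp):
--         i = inp.find('(')
--         j = i if i != -1 else -1
--         v = -1 if i != -1 else 0
--
--         while v != 0:
--             j += 1
--             if inp[j] == '(':
--                 v -= 1
--             elif inp[j] == ')':
--                 v += 1
--
--         if i != -1 and j > i:
--             r1 = set()
--             for s in g(inp[i + 1:j]):
--                 r1 |= {inp[:i + 1] + s + ')'}
--                 r1 |= {inp[:i] + s}
--             r = set()
--             for s1 in g(inp[j + 1:]):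
--                 for s2 in r1:
--                     r |= {s2 + s1}
--             return r
--         else:
--             return {inp}
--
--     return sorted(g(inp) - {inp})
-- ===== SOURCE B (Python) =====
-- def f(inp):
--     # One-pass fold with a stack of alternative-sets instead of A's recursive
--     # split-at-first-pair decomposition.  Unmatched '(' groups (where A raises
--     # IndexError) are folded back in with the '(' kept literally.
--     stack = [{""}]
--     for c in inp:
--         if c == '(':
--             stack.append({""})
--         elif c == ')' and len(stack) > 1:
--             inner = stack.pop()
--             pref = stack[-1]
--             stack[-1] = ({q + '(' + x + ')' for q in pref for x in inner}
--                          | {q + x for q in pref for x in inner})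
--         else:
--             stack[-1] = {q + c for q in stack[-1]}
--     while len(stack) > 1:
--         inner = stack.pop()
--         stack[-1] = {q + '(' + x for q in stack[-1] for x in inner}
--     return sorted(stack[0] - {inp})
-- ===== Notes on version B (the rewrite author's own statement) =====
-- stated objective: alternative
-- what changed: Replaces A's recursive split-at-first-matched-pair decomposition (re-scanning and re-slicing the string at every recursion level) by a single left-to-right pass that maintains an explicit stack of alternative-string sets, popping and combining a frame at each matched closing parenthesis.
-- outside the precondition, e.g. on f('('): A raises IndexError, B returns []
import Mathlib
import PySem

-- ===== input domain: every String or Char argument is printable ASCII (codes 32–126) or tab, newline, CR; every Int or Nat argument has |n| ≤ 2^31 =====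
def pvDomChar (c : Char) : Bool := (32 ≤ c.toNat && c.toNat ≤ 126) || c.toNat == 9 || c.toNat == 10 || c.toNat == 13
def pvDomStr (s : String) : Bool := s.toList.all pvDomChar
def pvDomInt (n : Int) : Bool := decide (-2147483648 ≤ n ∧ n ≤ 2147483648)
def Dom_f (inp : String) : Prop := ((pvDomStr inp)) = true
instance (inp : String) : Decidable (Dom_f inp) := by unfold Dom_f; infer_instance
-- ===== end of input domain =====

-- B replaces A's recursive split-at-first-pair decomposition by a single left-to-right
-- pass with an explicit stack of alternative-sets (objective: alternative, same
-- exponential output-bound cost); inputs with an unmatched opening parenthesis, where A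
-- raises IndexError, are excluded by Pre_f (B returns a value there, keeping it literally).

-- ===== PORT A =====
-- A's inner while loop: `while v != 0: j += 1; c = inp[j]; …` (fuel-bounded; none = IndexError)
def loopA (u : List Char) : Nat → Int → Int → Option Int
  | 0, v, j => if v = 0 then some j else none
  | fu + 1, v, j =>
    if v = 0 then some j else
      match PySem.List.pyGet? u (j + 1) with
      | none => none
      | some c => loopA u fu (if c = '(' then v - 1 else if c = ')' then v + 1 else v) (j + 1)

-- A's recursive g, on the character list (fuel-bounded recursion; none = IndexError).
-- Python's `j = i if i != -1 else -1` equals i in both cases, so j starts at i.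
def gA : List Char → Nat → Option (PySem.Set (List Char))
  | _, 0 => none
  | u, fuel + 1 =>
    let i : Int := PySem.Chars.find u ['('];
    let v : Int := if i ≠ -1 then -1 else 0;
    match loopA u (u.length + 1) v i with
    | none => none
    | some j =>
      if i ≠ -1 ∧ j > i then
        match gA (PySem.List.slice u (some (i + 1)) (some j)) fuel with
        | none => none
        | some Sm =>
          let r1 : PySem.Set (List Char) :=
            Sm.foldl (fun r1 s =>
              PySem.Set.add
                (PySem.Set.add r1 (PySem.List.slice u none (some (i + 1)) ++ s ++ [')']))
                (PySem.List.slice u none (some i) ++ s)) PySem.Set.empty;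
          match gA (PySem.List.slice u (some (j + 1)) none) fuel with
          | none => none
          | some Ss =>
            some (Ss.foldl (fun r s1 => r1.foldl (fun r s2 => PySem.Set.add r (s2 ++ s1)) r)
                    PySem.Set.empty)
      else some (PySem.Set.add PySem.Set.empty u)

def f (inp : String) : List String :=
  match gA inp.toList (inp.toList.length + 1) with
  | none => []   -- unreachable under Pre_f: Python raises IndexError here
  | some S =>
      PySem.List.sorted ((PySem.Set.diff S [inp.toList]).map (fun cs => String.mk cs))
        (fun x => x) false

-- ===== PORT B =====
-- the set {""}
def unitS : PySem.Set (List Char) := PySem.Set.ofList [([] : List Char)]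

-- {q + c for q in T}
def imgc (T : PySem.Set (List Char)) (c : Char) : PySem.Set (List Char) :=
  T.foldl (fun acc q => PySem.Set.add acc (q ++ [c])) PySem.Set.empty

-- the popped frame: {q+'('+x+')' …} | {q+x …}
def frameWrap (P I : PySem.Set (List Char)) : PySem.Set (List Char) :=
  PySem.Set.union
    (P.foldl (fun acc q => I.foldl (fun acc x => PySem.Set.add acc (q ++ '(' :: x ++ [')'])) acc)
      PySem.Set.empty)
    (P.foldl (fun acc q => I.foldl (fun acc x => PySem.Set.add acc (q ++ x)) acc)
      PySem.Set.empty)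

-- one step of B's loop body (stack top at the head)
def stepB (st : List (PySem.Set (List Char))) (c : Char) : List (PySem.Set (List Char)) :=
  if c = '(' then unitS :: st
  else if c = ')' ∧ st.length > 1 then
    match st with
    | inner :: pref :: rest => frameWrap pref inner :: rest
    | _ => st
  else
    match st with
    | top :: rest => imgc top c :: rest
    | [] => st

-- B's trailing while loop: fold leftover frames back in, keeping '(' literally
def mergeB (st : List (PySem.Set (List Char))) : PySem.Set (List Char) :=
  match st with
  | [] => PySem.Set.empty
  | h :: t =>
    t.foldl (fun inner pref =>
      pref.foldl (fun acc q => inner.foldl (fun acc x => PySem.Set.add acc (q ++ '(' :: x)) acc)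
        PySem.Set.empty) h

def f_alt (inp : String) : List String :=
  PySem.List.sorted
    ((PySem.Set.diff (mergeB (inp.toList.foldl stepB [unitS])) [inp.toList]).map
      (fun cs => String.mk cs)) (fun x => x) false

-- ===== PRECONDITION & SPEC =====
-- clamped open-paren height; unmatched ')' at height 0 is ignored (Nat subtraction clamps)
def scanOpen : List Char → Nat → Nat
  | [], h => h
  | c :: t, h => if c = '(' then scanOpen t (h + 1) else if c = ')' then scanOpen t (h - 1) else scanOpen t h

-- Pre_f excludes exactly the inputs with an unmatched opening parenthesis - there Python A raises IndexError.
def Pre_f (inp : String) : Prop := scanOpen inp.toList 0 = 0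
instance (inp : String) : Decidable (Pre_f inp) := by unfold Pre_f; infer_instance

def pvWitness_f : String := "a(b)(c)"

def Spec_f (inp : String) (out : List String) : Prop := out = f_alt inp
instance (inp : String) (out : List String) : Decidable (Spec_f inp out) := by unfold Spec_f; infer_instance

-- ===== CLAIM (what is proved, stated in full; the proofs are below) =====
def Claim_equal_f : Prop := ∀ (inp : String), Dom_f inp → Pre_f inp → Spec_f inp (f inp)

-- ===== LEMMAS AND PROOFS =====

-- set-membership equivalence ("equal as Python sets")
def SE (S T : PySem.Set (List Char)) : Prop := ∀ x, x ∈ S ↔ x ∈ T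

theorem SE_refl (S : PySem.Set (List Char)) : SE S S := fun _ => Iff.rfl

-- pointwise equivalence of stacks
def StE (st st' : List (PySem.Set (List Char))) : Prop := List.Forall₂ SE st st'

-- generic membership lemmas for the fold-of-add loop shapes both ports use
theorem mem_foldl_add2 {α β : Type} [BEq β] [LawfulBEq β] (l : List α) (g h : α → β)
    (init : PySem.Set β) (y : β) :
    y ∈ l.foldl (fun s b => PySem.Set.add (PySem.Set.add s (g b)) (h b)) init ↔
      y ∈ init ∨ ∃ b ∈ l, (y = g b ∨ y = h b) := by
  induction l generalizing init with
  | nil => simp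
  | cons b l ih =>
    simp only [List.foldl_cons, ih, PySem.Set.mem_add, List.mem_cons]
    aesop
theorem mem_foldl_foldl_add {α β γ : Type} [BEq β] [LawfulBEq β] (l1 : List α) (l2 : List γ)
    (g : α → γ → β) (init : PySem.Set β) (y : β) :
    y ∈ l1.foldl (fun r a => l2.foldl (fun r b => PySem.Set.add r (g a b)) r) init ↔
      y ∈ init ∨ ∃ a ∈ l1, ∃ b ∈ l2, y = g a b := by
  induction l1 generalizing init with
  | nil => simp
  | cons a l1 ih =>
    simp only [List.foldl_cons, ih, PySem.Set.mem_foldl_add, List.mem_cons]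
    aesop
theorem nodup_foldl_add {α β : Type} [BEq β] [LawfulBEq β] (l : List α) (g : α → β)
    (init : PySem.Set β) (h : init.Nodup) :
    (l.foldl (fun s b => PySem.Set.add s (g b)) init).Nodup := by
  induction l generalizing init with
  | nil => exact h
  | cons b l ih =>
    simp only [List.foldl_cons]
    exact ih _ (PySem.Set.nodup_add _ _ h)
theorem nodup_foldl_foldl_add {α β γ : Type} [BEq β] [LawfulBEq β] (l1 : List α) (l2 : List γ)
    (g : α → γ → β) (init : PySem.Set β) (hn : init.Nodup) :
    (l1.foldl (fun r a => l2.foldl (fun r b => PySem.Set.add r (g a b)) r) init).Nodup := by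
  induction l1 generalizing init with
  | nil => exact hn
  | cons a l1 ih =>
    simp only [List.foldl_cons]
    exact ih _ (nodup_foldl_add l2 _ _ hn)

-- the fully matched strings (every paren matched) and the no-unmatched-'(' strings
inductive Mat : List Char → Prop
  | nil : Mat []
  | lit : ∀ (c : Char) (m : List Char), c ≠ '(' → c ≠ ')' → Mat m → Mat (c :: m)
  | grp : ∀ (m1 m2 : List Char), Mat m1 → Mat m2 → Mat ('(' :: m1 ++ ')' :: m2)

inductive Bal : List Char → Prop
  | nil : Bal []
  | lit : ∀ (c : Char) (s : List Char), c ≠ '(' → Bal s → Bal (c :: s)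
  | grp : ∀ (m s : List Char), Mat m → Bal s → Bal ('(' :: m ++ ')' :: s)

theorem matBal {m : List Char} (h : Mat m) : Bal m := by
  induction h with
  | nil => exact Bal.nil
  | lit c m h1 h2 _ ih => exact Bal.lit c m h1 ih
  | grp m1 m2 h1 _ ih1 ih2 => exact Bal.grp m1 m2 h1 ih2

theorem split1'_aux : ∀ (n : Nat) (t : List Char), t.length ≤ n → ∀ (h : Nat),
    scanOpen t (h + 1) = 0 → ∃ m s, t = m ++ ')' :: s ∧ Mat m ∧ scanOpen s h = 0 := by
  intro n
  induction n with
  | zero =>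
    intro t ht h hs
    match t with
    | [] => simp [scanOpen] at hs
    | c :: t' => simp at ht
  | succ n ih =>
    intro t ht h hs
    match t with
    | [] => simp [scanOpen] at hs
    | c :: t' =>
      simp only [List.length_cons] at ht
      by_cases h1 : c = '('
      · subst h1
        simp [scanOpen] at hs
        obtain ⟨m1, s1, ht', hm1, hs1⟩ := ih t' (by omega) (h + 1) hs
        have hlen : s1.length ≤ n := by
          have := congrArg List.length ht'; simp at this; omega
        obtain ⟨m2, s2, hs1', hm2, hs2⟩ := ih s1 hlen h hs1
        refine ⟨'(' :: m1 ++ ')' :: m2, s2, ?_, Mat.grp m1 m2 hm1 hm2, hs2⟩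
        simp [ht', hs1']
      · by_cases h2 : c = ')'
        · subst h2
          simp [scanOpen] at hs
          exact ⟨[], t', rfl, Mat.nil, hs⟩
        · simp only [scanOpen, if_neg h1, if_neg h2] at hs
          obtain ⟨m1, s1, ht', hm1, hs1⟩ := ih t' (by omega) h hs
          exact ⟨c :: m1, s1, by simp [ht'], Mat.lit c m1 h1 h2 hm1, hs1⟩

theorem split1' : ∀ (t : List Char) (h : Nat), scanOpen t (h + 1) = 0 →
    ∃ m s, t = m ++ ')' :: s ∧ Mat m ∧ scanOpen s h = 0 :=
  fun t => split1'_aux t.length t le_rfl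

theorem balOfScan_aux : ∀ (n : Nat) (u : List Char), u.length ≤ n → scanOpen u 0 = 0 → Bal u := by
  intro n
  induction n with
  | zero =>
    intro u hu _
    match u with
    | [] => exact Bal.nil
    | c :: u' => simp at hu
  | succ n ih =>
    intro u hu hs
    match u with
    | [] => exact Bal.nil
    | c :: u' =>
      simp only [List.length_cons] at hu
      by_cases h1 : c = '('
      · subst h1
        simp [scanOpen] at hs
        obtain ⟨m, s, hu', hm, hs'⟩ := split1' u' 0 hs
        have hlen : s.length ≤ n := by
          have := congrArg List.length hu'; simp at this; omega
        exact hu' ▸ Bal.grp m s hm (ih s hlen hs')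
      · have hs' : scanOpen u' 0 = 0 := by
          by_cases h2 : c = ')'
          · subst h2; simpa [scanOpen] using hs
          · simpa [scanOpen, h1, h2] using hs
        exact Bal.lit c u' h1 (ih u' (by omega) hs')

theorem balOfScan : ∀ (u : List Char), scanOpen u 0 = 0 → Bal u :=
  fun u => balOfScan_aux u.length u le_rfl

theorem balDecomp {u : List Char} (hb : Bal u) (hm : '(' ∈ u) :
    ∃ p m s, u = p ++ '(' :: m ++ ')' :: s ∧ '(' ∉ p ∧ Mat m ∧ Bal s := by
  induction hb with
  | nil => simp at hm
  | lit c s hc hbs ih =>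
    have hms : '(' ∈ s := by
      rcases List.mem_cons.mp hm with h | h
      · exact absurd h.symm hc
      · exact h
    obtain ⟨p, m, s', he, hp, hmm, hbs'⟩ := ih hms
    exact ⟨c :: p, m, s', by simp [he], by simp only [List.mem_cons, not_or]; exact ⟨fun h => hc h.symm, hp⟩, hmm, hbs'⟩
  | grp m s hmm hbs _ => exact ⟨[], m, s, rfl, by simp, hmm, hbs⟩

-- find characterization
theorem find_no {u : List Char} (h : '(' ∉ u) : PySem.Chars.find u ['('] = -1 := by
  rw [PySem.Chars.find_eq_neg_one_iff]
  rw [List.singleton_infix_iff]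
  exact h

theorem find_at {p t : List Char} (h : '(' ∉ p) :
    PySem.Chars.find (p ++ '(' :: t) ['('] = (p.length : Int) := by
  have hin : ['('] <:+: (p ++ '(' :: t) :=
    (List.singleton_infix_iff _ _).mpr (by simp)
  have hnn : 0 ≤ PySem.Chars.find (p ++ '(' :: t) ['('] :=
    (PySem.Chars.find_nonneg_iff _ _).mpr hin
  obtain ⟨hpre, hmin⟩ := PySem.Chars.find_spec hnn
  set k := (PySem.Chars.find (p ++ '(' :: t) ['(']).toNat with hk
  have hku : PySem.Chars.find (p ++ '(' :: t) ['('] = (k : Int) := by omega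
  rw [hku]
  -- the position k holds the char '('
  have hkc : (p ++ '(' :: t)[k]? = some '(' := by
    rw [← List.head?_drop]
    obtain ⟨r, hr⟩ := hpre
    rw [← hr]; rfl
  -- k cannot exceed p.length: at p.length there IS a prefix ['(']
  have hle : k ≤ p.length := by
    by_contra hgt
    have hmin' : ¬ ['('] <+: List.drop p.length (p ++ '(' :: t) := hmin p.length (by omega)
    rw [List.drop_left] at hmin'
    exact hmin' ⟨t, rfl⟩
  -- and k cannot be inside p ('(' ∉ p)
  have hge : ¬ k < p.length := by
    intro hlt
    rw [List.getElem?_append_left hlt] at hkc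
    exact h (List.mem_of_getElem? hkc)
  omega

-- the while loop scans a fully matched block without returning
theorem loop_mat {m : List Char} (hm : Mat m) :
    ∀ (u a rest : List Char) (v : Int) (fu : Nat), u = a ++ m ++ rest → v ≤ -1 →
      m.length + 1 ≤ fu →
      loopA u fu v ((a.length : Int) - 1) = loopA u (fu - m.length) v ((a.length : Int) + m.length - 1) := by
  induction hm with
  | nil => intro u a rest v fu hu hv hfu; simp
  | lit c m' hc1 hc2 _ ih =>
    intro u' a rest v fu hu hv hfu
    obtain ⟨k, rfl⟩ : ∃ k, fu = k + 1 := ⟨fu - 1, by simp at hfu; omega⟩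
    have hget : PySem.List.pyGet? u' ((a.length : Int) - 1 + 1) = some c := by
      have : u' = a ++ c :: (m' ++ rest) := by simp [hu]
      rw [this]
      have h1 : (a.length : Int) - 1 + 1 = (a.length : Int) := by ring
      rw [h1, PySem.List.pyGet?_append_length]
    rw [show loopA u' (k + 1) v ((a.length : Int) - 1)
        = (if v = 0 then some ((a.length : Int) - 1) else
            match PySem.List.pyGet? u' ((a.length : Int) - 1 + 1) with
            | none => none
            | some c' => loopA u' k (if c' = '(' then v - 1 else if c' = ')' then v + 1 else v)
                ((a.length : Int) - 1 + 1)) from rfl]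
    rw [if_neg (by omega), hget]
    simp only [if_neg hc1, if_neg hc2]
    have harg : (a.length : Int) - 1 + 1 = ((a ++ [c]).length : Int) - 1 := by simp only [List.length_append, List.length_cons, List.length_nil]; push_cast; ring
    rw [harg, ih u' (a ++ [c]) rest v k (by simp [hu]) hv (by simp at hfu ⊢; omega)]
    congr 1 <;> (try simp) <;> (try omega) <;> (try ring)
  | grp m1 m2 hm1 hm2 ih1 ih2 =>
    intro u' a rest v fu hu hv hfu
    simp only [List.length_cons, List.length_append] at hfu
    obtain ⟨k, rfl⟩ : ∃ k, fu = k + 1 := ⟨fu - 1, by omega⟩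
    have hget : PySem.List.pyGet? u' ((a.length : Int) - 1 + 1) = some '(' := by
      have : u' = a ++ '(' :: (m1 ++ ')' :: m2 ++ rest) := by simp [hu]
      rw [this]
      have h1 : (a.length : Int) - 1 + 1 = (a.length : Int) := by ring
      rw [h1, PySem.List.pyGet?_append_length]
    rw [show loopA u' (k + 1) v ((a.length : Int) - 1)
        = (if v = 0 then some ((a.length : Int) - 1) else
            match PySem.List.pyGet? u' ((a.length : Int) - 1 + 1) with
            | none => none
            | some c' => loopA u' k (if c' = '(' then v - 1 else if c' = ')' then v + 1 else v)
                ((a.length : Int) - 1 + 1)) from rfl]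
    rw [if_neg (by omega), hget]
    simp only [reduceIte]
    have harg : (a.length : Int) - 1 + 1 = ((a ++ ['(']).length : Int) - 1 := by simp only [List.length_append, List.length_cons, List.length_nil]; push_cast; ring
    rw [harg, ih1 u' (a ++ ['(']) (')' :: m2 ++ rest) (v - 1) k
        (by simp [hu]) (by omega) (by omega)]
    -- now the closing ')' of the group
    obtain ⟨k2, hk2⟩ : ∃ k2, k - m1.length = k2 + 1 := ⟨k - m1.length - 1, by omega⟩
    have hget2 : PySem.List.pyGet? u' (((a ++ ['(']).length : Int) + m1.length - 1 + 1) = some ')' := by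
      have : u' = (a ++ '(' :: m1) ++ ')' :: (m2 ++ rest) := by simp [hu]
      rw [this]
      have h1 : (((a ++ ['(']).length : Int) + m1.length - 1 + 1) = ((a ++ '(' :: m1).length : Int) := by simp only [List.length_append, List.length_cons, List.length_nil]; push_cast; ring
      rw [h1, PySem.List.pyGet?_append_length]
    rw [hk2]
    rw [show loopA u' (k2 + 1) (v - 1) (((a ++ ['(']).length : Int) + m1.length - 1)
        = (if v - 1 = 0 then some (((a ++ ['(']).length : Int) + m1.length - 1) else
            match PySem.List.pyGet? u' (((a ++ ['(']).length : Int) + m1.length - 1 + 1) with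
            | none => none
            | some c' => loopA u' k2 (if c' = '(' then v - 1 - 1 else if c' = ')' then v - 1 + 1 else v - 1)
                (((a ++ ['(']).length : Int) + m1.length - 1 + 1)) from rfl]
    rw [if_neg (by omega), hget2]
    simp only [reduceIte]
    rw [if_neg (show ¬((')':Char) = '(') by decide)]
    have hv1 : v - 1 + 1 = v := by ring
    have harg2 : (((a ++ ['(']).length : Int) + m1.length - 1 + 1)
        = ((a ++ '(' :: m1 ++ [')']).length : Int) - 1 := by simp only [List.length_append, List.length_cons, List.length_nil]; push_cast; ring
    rw [hv1, harg2, ih2 u' (a ++ '(' :: m1 ++ [')']) rest v k2 (by simp [hu]) hv (by omega)]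
    congr 1 <;> (try simp) <;> (try omega) <;> (try ring)


theorem loopA_zero (u : List Char) (fu : Nat) (j : Int) : loopA u fu 0 j = some j := by
  cases fu <;> simp [loopA]

theorem loop_full {p m s : List Char} (hm : Mat m) :
    loopA (p ++ '(' :: m ++ ')' :: s) ((p ++ '(' :: m ++ ')' :: s).length + 1) (-1) (p.length : Int)
      = some ((p.length : Int) + m.length + 1) := by
  have h0 : (p.length : Int) = ((p ++ ['(']).length : Int) - 1 := by
    simp only [List.length_append, List.length_cons, List.length_nil]; push_cast; ring
  rw [h0, loop_mat hm (p ++ '(' :: m ++ ')' :: s) (p ++ ['(']) (')' :: s) (-1)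
      ((p ++ '(' :: m ++ ')' :: s).length + 1) (by simp) (by omega)
      (by simp only [List.length_append, List.length_cons]; omega)]
  obtain ⟨k2, hk2⟩ : ∃ k2, (p ++ '(' :: m ++ ')' :: s).length + 1 - m.length = k2 + 1 :=
    ⟨(p ++ '(' :: m ++ ')' :: s).length - m.length, by
      simp only [List.length_append, List.length_cons]; omega⟩
  rw [hk2]
  have hget : PySem.List.pyGet? (p ++ '(' :: m ++ ')' :: s)
      (((p ++ ['(']).length : Int) + m.length - 1 + 1) = some ')' := by
    have hsh : p ++ '(' :: m ++ ')' :: s = (p ++ '(' :: m) ++ ')' :: s := by simp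
    rw [hsh]
    have h1 : ((p ++ ['(']).length : Int) + m.length - 1 + 1 = ((p ++ '(' :: m).length : Int) := by
      simp only [List.length_append, List.length_cons, List.length_nil]; push_cast; ring
    rw [h1, PySem.List.pyGet?_append_length]
  rw [show loopA (p ++ '(' :: m ++ ')' :: s) (k2 + 1) (-1) (((p ++ ['(']).length : Int) + m.length - 1)
      = (if (-1 : Int) = 0 then some (((p ++ ['(']).length : Int) + m.length - 1) else
          match PySem.List.pyGet? (p ++ '(' :: m ++ ')' :: s) (((p ++ ['(']).length : Int) + m.length - 1 + 1) with
          | none => none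
          | some c' => loopA (p ++ '(' :: m ++ ')' :: s) k2
              (if c' = '(' then (-1 : Int) - 1 else if c' = ')' then (-1 : Int) + 1 else (-1 : Int))
              (((p ++ ['(']).length : Int) + m.length - 1 + 1)) from rfl]
  rw [if_neg (by omega), hget]
  simp only [reduceIte]
  rw [if_neg (show ¬((')':Char) = '(') by decide)]
  norm_num [loopA_zero]
  omega

-- ===== B-side machinery =====
-- the set of strings B's pass produces for a whole (sub)string
def Bcore (u : List Char) : PySem.Set (List Char) := mergeB (u.foldl stepB [unitS])

-- {q ++ x | q ∈ P, x ∈ S}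
def combSet (P S : PySem.Set (List Char)) : PySem.Set (List Char) :=
  P.foldl (fun acc q => S.foldl (fun acc x => PySem.Set.add acc (q ++ x)) acc) PySem.Set.empty

theorem SE_trans {A B C : PySem.Set (List Char)} (h1 : SE A B) (h2 : SE B C) : SE A C :=
  fun x => (h1 x).trans (h2 x)

theorem StE_refl (st : List (PySem.Set (List Char))) : StE st st := by
  induction st with
  | nil => exact List.Forall₂.nil
  | cons T tl ih => exact List.Forall₂.cons (SE_refl T) ih

theorem mem_unitS (y : List Char) : y ∈ unitS ↔ y = [] := by
  simp [unitS, PySem.Set.mem_ofList]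

theorem mem_imgc {T : PySem.Set (List Char)} {c : Char} (y : List Char) :
    y ∈ imgc T c ↔ ∃ q ∈ T, y = q ++ [c] := by
  rw [imgc, PySem.Set.mem_foldl_add]
  simp [PySem.Set.empty]

theorem mem_frameWrap {P I : PySem.Set (List Char)} (y : List Char) :
    y ∈ frameWrap P I ↔ ∃ q ∈ P, ∃ x ∈ I, (y = q ++ '(' :: x ++ [')'] ∨ y = q ++ x) := by
  rw [frameWrap, PySem.Set.mem_union, mem_foldl_foldl_add, mem_foldl_foldl_add]
  simp only [PySem.Set.empty, List.not_mem_nil, false_or]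
  aesop

theorem mem_combSet {P S : PySem.Set (List Char)} (y : List Char) :
    y ∈ combSet P S ↔ ∃ q ∈ P, ∃ x ∈ S, y = q ++ x := by
  rw [combSet, mem_foldl_foldl_add]
  simp [PySem.Set.empty]

theorem combSet_congr {P P' S S' : PySem.Set (List Char)} (hP : SE P P') (hS : SE S S') :
    SE (combSet P S) (combSet P' S') := by
  intro y
  rw [mem_combSet, mem_combSet]
  constructor
  · rintro ⟨q, hq, x, hx, rfl⟩; exact ⟨q, (hP q).mp hq, x, (hS x).mp hx, rfl⟩
  · rintro ⟨q, hq, x, hx, rfl⟩; exact ⟨q, (hP q).mpr hq, x, (hS x).mpr hx, rfl⟩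

theorem frameWrap_congr {P P' I I' : PySem.Set (List Char)} (hP : SE P P') (hI : SE I I') :
    SE (frameWrap P I) (frameWrap P' I') := by
  intro y
  rw [mem_frameWrap, mem_frameWrap]
  constructor
  · rintro ⟨q, hq, x, hx, hy⟩; exact ⟨q, (hP q).mp hq, x, (hI x).mp hx, hy⟩
  · rintro ⟨q, hq, x, hx, hy⟩; exact ⟨q, (hP q).mpr hq, x, (hI x).mpr hx, hy⟩

theorem stepB_open (st : List (PySem.Set (List Char))) : stepB st '(' = unitS :: st := by
  simp [stepB]

theorem stepB_close (inner pref : PySem.Set (List Char)) (rest : List (PySem.Set (List Char))) :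
    stepB (inner :: pref :: rest) ')' = frameWrap pref inner :: rest := by
  simp [stepB]

theorem stepB_single {T : PySem.Set (List Char)} {c : Char} (h : c ≠ '(') :
    stepB [T] c = [imgc T c] := by
  simp only [stepB, if_neg h, List.length_cons, List.length_nil]
  rw [if_neg (by omega)]

theorem stepB_lit {st : List (PySem.Set (List Char))} {T : PySem.Set (List Char)} {c : Char}
    (h1 : c ≠ '(') (h2 : c ≠ ')') : stepB (T :: st) c = imgc T c :: st := by
  simp only [stepB, if_neg h1, if_neg (by simp [h2] : ¬(c = ')' ∧ (T :: st).length > 1))]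

-- the generic "prefix every element by T" lifting step
theorem gen_lift {T F1 FT Z S : PySem.Set (List Char)}
    (hFT : ∀ y, y ∈ FT ↔ ∃ q ∈ T, ∃ w ∈ F1, y = q ++ w)
    (hZ : SE Z (combSet F1 S)) : SE (combSet FT S) (combSet T Z) := by
  intro y
  rw [mem_combSet, mem_combSet]
  constructor
  · rintro ⟨w, hw, x, hx, rfl⟩
    obtain ⟨q, hq, w1, hw1, rfl⟩ := (hFT w).mp hw
    exact ⟨q, hq, w1 ++ x, (hZ _).mpr ((mem_combSet _).mpr ⟨w1, hw1, x, hx, rfl⟩),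
      by simp [List.append_assoc]⟩
  · rintro ⟨q, hq, z, hz, rfl⟩
    obtain ⟨w1, hw1, x, hx, rfl⟩ := (mem_combSet _).mp ((hZ z).mp hz)
    exact ⟨q ++ w1, (hFT _).mpr ⟨q, hq, w1, hw1, rfl⟩, x, hx, by simp [List.append_assoc]⟩

-- lifting shapes: the frames B builds over T are T-prefixed copies of the frames over {""}
theorem lift_imgc (T : PySem.Set (List Char)) (c : Char) :
    ∀ y, y ∈ imgc T c ↔ ∃ q ∈ T, ∃ w ∈ imgc unitS c, y = q ++ w := by
  intro y
  rw [mem_imgc]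
  constructor
  · rintro ⟨q, hq, rfl⟩
    exact ⟨q, hq, [c], (mem_imgc _).mpr ⟨[], by simp [mem_unitS], rfl⟩, rfl⟩
  · rintro ⟨q, hq, w, hw, rfl⟩
    obtain ⟨e, he, rfl⟩ := (mem_imgc _).mp hw
    rw [mem_unitS] at he; subst he
    exact ⟨q, hq, rfl⟩

theorem lift_frameWrap (T C : PySem.Set (List Char)) :
    ∀ y, y ∈ frameWrap T C ↔ ∃ q ∈ T, ∃ w ∈ frameWrap unitS C, y = q ++ w := by
  intro y
  simp only [mem_frameWrap, mem_unitS]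
  constructor
  · rintro ⟨q, hq, x, hx, hy | hy⟩
    · refine ⟨q, hq, '(' :: x ++ [')'], ⟨[], rfl, x, hx, Or.inl (by simp)⟩, by simpa using hy⟩
    · refine ⟨q, hq, x, ⟨[], rfl, x, hx, Or.inr (by simp)⟩, hy⟩
  · rintro ⟨q, hq, w, ⟨e, he, x, hx, hw⟩, rfl⟩
    subst he
    simp only [List.nil_append] at hw
    rcases hw with hw | hw
    · exact ⟨q, hq, x, hx, Or.inl (by simp [hw])⟩
    · exact ⟨q, hq, x, hx, Or.inr (by simp [hw])⟩

theorem SE_combSet_unit (T : PySem.Set (List Char)) : SE T (combSet T unitS) := by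
  intro y
  rw [mem_combSet]
  constructor
  · intro hy; exact ⟨y, hy, [], by simp [mem_unitS], by simp⟩
  · rintro ⟨q, hq, x, hx, rfl⟩
    rw [mem_unitS] at hx; subst hx; simpa using hq

-- stack-shape inversions
theorem forall2_singleton {st : List (PySem.Set (List Char))} {Y : PySem.Set (List Char)}
    (h : StE st [Y]) : ∃ X, st = [X] ∧ SE X Y := by
  cases h with
  | cons h1 htl => cases htl with | nil => exact ⟨_, rfl, h1⟩

theorem StE_trans {a b c : List (PySem.Set (List Char))} (h1 : StE a b) (h2 : StE b c) :
    StE a c := by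
  induction h1 generalizing c with
  | nil => cases h2; exact List.Forall₂.nil
  | cons hx _ ih =>
    cases h2 with
    | cons hy htl2 => exact List.Forall₂.cons (SE_trans hx hy) (ih htl2)

theorem mem_singleton_set (p y : List Char) : y ∈ PySem.Set.ofList [p] ↔ y = p := by
  rw [PySem.Set.mem_ofList]; simp

theorem foldp_lit {p : List Char} (hp : '(' ∉ p) (T : PySem.Set (List Char)) :
    StE (p.foldl stepB [T]) [combSet T (PySem.Set.ofList [p])] := by
  induction p generalizing T with
  | nil =>
    refine List.Forall₂.cons ?_ List.Forall₂.nil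
    intro y
    rw [mem_combSet]
    constructor
    · intro hy; exact ⟨y, hy, [], by simp [mem_singleton_set], by simp⟩
    · rintro ⟨q, hq, x, hx, rfl⟩
      rw [mem_singleton_set] at hx; subst hx; simpa using hq
  | cons c p' ih =>
    have hc : c ≠ '(' := fun h => hp (h ▸ List.mem_cons_self)
    have hp' : '(' ∉ p' := fun h => hp (List.mem_cons_of_mem _ h)
    rw [List.foldl_cons, stepB_single hc]
    refine StE_trans (ih hp' (imgc T c)) (List.Forall₂.cons ?_ List.Forall₂.nil)
    intro y
    rw [mem_combSet, mem_combSet]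
    constructor
    · rintro ⟨q, hq, z, hz, hy⟩
      rw [mem_singleton_set] at hz
      obtain ⟨q', hq', hq''⟩ := (mem_imgc q).mp hq
      refine ⟨q', hq', c :: p', by rw [mem_singleton_set], ?_⟩
      rw [hy, hz, hq'']; simp
    · rintro ⟨q, hq, z, hz, hy⟩
      rw [mem_singleton_set] at hz
      refine ⟨q ++ [c], (mem_imgc _).mpr ⟨q, hq, rfl⟩, p', by rw [mem_singleton_set], ?_⟩
      rw [hy, hz]; simp

theorem SLm {m : List Char} (hm : Mat m) :
    ∀ (T : PySem.Set (List Char)) (rest : List (PySem.Set (List Char))),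
      StE (m.foldl stepB (T :: rest)) (combSet T (Bcore m) :: rest) := by
  induction hm with
  | nil =>
    intro T rest
    refine List.Forall₂.cons ?_ (StE_refl rest)
    exact SE_combSet_unit T
  | lit c m' hc1 hc2 hm' ih =>
    intro T rest
    rw [show (c :: m').foldl stepB (T :: rest) = m'.foldl stepB (imgc T c :: rest) from by
      simp only [List.foldl_cons, stepB_lit hc1 hc2]]
    obtain ⟨X, hXeq, hXse⟩ := forall2_singleton (ih (imgc unitS c) [])
    have hBc : Bcore (c :: m') = X := by
      unfold Bcore
      rw [show (c :: m').foldl stepB [unitS] = m'.foldl stepB [imgc unitS c] from by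
        simp only [List.foldl_cons, stepB_lit hc1 hc2], hXeq]
      rfl
    refine StE_trans (ih (imgc T c) rest) (List.Forall₂.cons ?_ (StE_refl rest))
    rw [hBc]
    exact gen_lift (lift_imgc T c) hXse
  | grp m1 m2 hm1 hm2 ih1 ih2 =>
    intro T rest
    have key : ∀ (T : PySem.Set (List Char)) (rest : List (PySem.Set (List Char))),
        StE (('(' :: m1 ++ ')' :: m2).foldl stepB (T :: rest))
          (combSet (frameWrap T (combSet unitS (Bcore m1))) (Bcore m2) :: rest) := by
      intro T rest
      rw [show ('(' :: m1 ++ ')' :: m2).foldl stepB (T :: rest)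
          = (')' :: m2).foldl stepB (m1.foldl stepB (unitS :: T :: rest)) from by
        simp only [List.cons_append, List.foldl_cons, List.foldl_append, stepB_open]]
      obtain ⟨A, st1, hA1, htl, hEq⟩ := List.forall₂_cons_right_iff.mp (ih1 unitS (T :: rest))
      obtain ⟨B, st2, hA2, htl2, hEq2⟩ := List.forall₂_cons_right_iff.mp htl
      rw [hEq2] at hEq
      rw [hEq, List.foldl_cons, stepB_close]
      refine StE_trans (ih2 (frameWrap B A) _) (List.Forall₂.cons ?_ htl2)
      exact combSet_congr (frameWrap_congr hA2 hA1) (SE_refl _)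
    obtain ⟨Z, hZeq, hZse⟩ := forall2_singleton (key unitS [])
    have hBc : Bcore ('(' :: m1 ++ ')' :: m2) = Z := by
      unfold Bcore; rw [hZeq]; rfl
    refine StE_trans (key T rest) (List.Forall₂.cons ?_ (StE_refl rest))
    rw [hBc]
    exact gen_lift (lift_frameWrap T (combSet unitS (Bcore m1))) hZse

theorem SLb {s : List Char} (hs : Bal s) :
    ∀ (T : PySem.Set (List Char)), StE (s.foldl stepB [T]) [combSet T (Bcore s)] := by
  induction hs with
  | nil =>
    intro T
    exact List.Forall₂.cons (SE_combSet_unit T) List.Forall₂.nil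
  | lit c s' hc hbs ih =>
    intro T
    rw [show (c :: s').foldl stepB [T] = s'.foldl stepB [imgc T c] from by
      simp only [List.foldl_cons, stepB_single hc]]
    obtain ⟨X, hXeq, hXse⟩ := forall2_singleton (ih (imgc unitS c))
    have hBc : Bcore (c :: s') = X := by
      unfold Bcore
      rw [show (c :: s').foldl stepB [unitS] = s'.foldl stepB [imgc unitS c] from by
        simp only [List.foldl_cons, stepB_single hc], hXeq]
      rfl
    refine StE_trans (ih (imgc T c)) (List.Forall₂.cons ?_ List.Forall₂.nil)
    rw [hBc]
    exact gen_lift (lift_imgc T c) hXse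
  | grp m s' hm hbs ih =>
    intro T
    have key : ∀ (T : PySem.Set (List Char)),
        StE (('(' :: m ++ ')' :: s').foldl stepB [T])
          (combSet (frameWrap T (combSet unitS (Bcore m))) (Bcore s') :: []) := by
      intro T
      rw [show ('(' :: m ++ ')' :: s').foldl stepB [T]
          = (')' :: s').foldl stepB (m.foldl stepB [unitS, T]) from by
        simp only [List.cons_append, List.foldl_cons, List.foldl_append, stepB_open]]
      obtain ⟨A, st1, hA1, htl, hEq⟩ := List.forall₂_cons_right_iff.mp (SLm hm unitS [T])
      obtain ⟨B, st2, hA2, htl2, hEq2⟩ := List.forall₂_cons_right_iff.mp htl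
      have hnil : st2 = [] := by cases htl2; rfl
      rw [hnil] at hEq2; rw [hEq2] at hEq
      rw [hEq, List.foldl_cons, stepB_close]
      refine StE_trans (ih (frameWrap B A)) (List.Forall₂.cons ?_ List.Forall₂.nil)
      exact combSet_congr (frameWrap_congr hA2 hA1) (SE_refl _)
    obtain ⟨Z, hZeq, hZse⟩ := forall2_singleton (key unitS)
    have hBc : Bcore ('(' :: m ++ ')' :: s') = Z := by
      unfold Bcore; rw [hZeq]; rfl
    refine StE_trans (key T) (List.Forall₂.cons ?_ List.Forall₂.nil)
    rw [hBc]
    exact gen_lift (lift_frameWrap T (combSet unitS (Bcore m))) hZse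

-- Nodup plumbing
theorem nodup_unitS : unitS.Nodup := PySem.Set.nodup_ofList _

theorem nodup_imgc (T : PySem.Set (List Char)) (c : Char) : (imgc T c).Nodup :=
  nodup_foldl_add _ _ _ List.nodup_nil

theorem nodup_frameWrap (P I : PySem.Set (List Char)) : (frameWrap P I).Nodup :=
  PySem.Set.nodup_union _ _ (nodup_foldl_foldl_add _ _ _ _ List.nodup_nil)

theorem stepB_nil {c : Char} (h : c ≠ '(') : stepB [] c = [] := by
  simp [stepB, h]

theorem nodup_stepB (st : List (PySem.Set (List Char))) (c : Char)
    (h : ∀ S ∈ st, S.Nodup) : ∀ S ∈ stepB st c, S.Nodup := by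
  by_cases hc : c = '('
  · subst hc
    rw [stepB_open]
    intro S hS
    rcases List.mem_cons.mp hS with rfl | hS
    · exact nodup_unitS
    · exact h S hS
  · match st with
    | [] => rw [stepB_nil hc]; intro S hS; simp at hS
    | [T] =>
      rw [stepB_single hc]
      intro S hS
      rcases List.mem_cons.mp hS with rfl | hS
      · exact nodup_imgc T c
      · simp at hS
    | T :: P :: tl =>
      by_cases hc2 : c = ')'
      · subst hc2
        rw [stepB_close]
        intro S hS
        rcases List.mem_cons.mp hS with rfl | hS
        · exact nodup_frameWrap P T
        · exact h S (by simp [hS])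
      · rw [stepB_lit hc hc2]
        intro S hS
        rcases List.mem_cons.mp hS with rfl | hS
        · exact nodup_imgc T c
        · exact h S (by simp at hS ⊢; tauto)

theorem nodup_stack_foldB (u : List Char) (st : List (PySem.Set (List Char)))
    (h : ∀ S ∈ st, S.Nodup) : ∀ S ∈ u.foldl stepB st, S.Nodup := by
  induction u generalizing st with
  | nil => exact h
  | cons c u ih => exact ih _ (nodup_stepB st c h)

theorem nodup_mergeB_aux : ∀ (t : List (PySem.Set (List Char))) (h0 : PySem.Set (List Char)),
    h0.Nodup →
    (t.foldl (fun inner pref =>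
      pref.foldl (fun acc q => inner.foldl (fun acc x => PySem.Set.add acc (q ++ '(' :: x)) acc)
        PySem.Set.empty) h0).Nodup := by
  intro t
  induction t with
  | nil => intro h0 h; exact h
  | cons pref t ih =>
    intro h0 h
    simp only [List.foldl_cons]
    exact ih _ (nodup_foldl_foldl_add _ _ _ _ List.nodup_nil)

theorem nodup_mergeB (st : List (PySem.Set (List Char))) (h : ∀ S ∈ st, S.Nodup) :
    (mergeB st).Nodup := by
  match st with
  | [] => exact List.nodup_nil
  | h0 :: t => exact nodup_mergeB_aux t h0 (h h0 (by simp))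

theorem nodup_Bcore (u : List Char) : (Bcore u).Nodup := by
  refine nodup_mergeB _ (nodup_stack_foldB u [unitS] ?_)
  intro S hS
  rcases List.mem_cons.mp hS with rfl | hS
  · exact nodup_unitS
  · simp at hS

-- ===== the main induction =====
theorem SE_unit_combSet (S : PySem.Set (List Char)) : SE (combSet unitS S) S := by
  intro y
  rw [mem_combSet]
  constructor
  · rintro ⟨q, hq, x, hx, rfl⟩
    rw [mem_unitS] at hq; subst hq; simpa using hx
  · intro hy; exact ⟨[], by simp [mem_unitS], y, hy, by simp⟩

theorem Bcore_noparen {u : List Char} (hmem : '(' ∉ u) :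
    SE (Bcore u) (PySem.Set.ofList [u]) := by
  obtain ⟨X, hXeq, hXse⟩ := forall2_singleton (foldp_lit hmem unitS)
  have hBc : Bcore u = X := by unfold Bcore; rw [hXeq]; rfl
  rw [hBc]
  refine SE_trans hXse ?_
  intro y
  rw [mem_combSet, mem_singleton_set]
  constructor
  · rintro ⟨q, hq, x, hx, rfl⟩
    rw [mem_unitS] at hq; subst hq
    rw [mem_singleton_set] at hx; subst hx; rfl
  · rintro rfl
    exact ⟨[], by simp [mem_unitS], _, by rw [mem_singleton_set], by simp⟩

theorem ML : ∀ (fuel : Nat) (u : List Char), Bal u → u.length < fuel →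
    ∃ S, gA u fuel = some S ∧ S.Nodup ∧ SE S (Bcore u) := by
  intro fuel
  induction fuel with
  | zero => intro u _ h; omega
  | succ fu ih =>
    intro u hb hlen
    by_cases hmem : '(' ∈ u
    · obtain ⟨p, m, s, rfl, hp, hm, hs⟩ := balDecomp hb hmem
      have hfind : PySem.Chars.find (p ++ '(' :: m ++ ')' :: s) ['('] = (p.length : Int) := by simpa using find_at (t := m ++ ')' :: s) hp
      have hloop := loop_full (p := p) (m := m) (s := s) hm
      have hlen' : (p ++ '(' :: m ++ ')' :: s).length = p.length + m.length + s.length + 2 := by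
        simp only [List.length_append, List.length_cons]; omega
      obtain ⟨Sm, hgm, hNm, hEm⟩ := ih m (matBal hm) (by omega)
      obtain ⟨Ss, hgs, hNs, hEs⟩ := ih s hs (by omega)
      -- the four slices A takes
      have hsl1 : PySem.List.slice (p ++ '(' :: m ++ ')' :: s) (some ((p.length : Int) + 1))
          (some ((p.length : Int) + m.length + 1)) = m := by
        have h1 : ((p.length : Int) + 1) = ((p.length + 1 : Nat) : Int) := by push_cast; ring
        have h2 : ((p.length : Int) + ↑m.length + 1) = ((p.length + 1 + m.length : Nat) : Int) := by
          push_cast; ring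
        rw [h1, h2, PySem.List.slice_natCast]
        rw [show p ++ '(' :: m ++ ')' :: s = (p ++ ['(']) ++ (m ++ ')' :: s) from by simp]
        rw [show p.length + 1 = (p ++ ['(']).length from by simp, List.drop_left]
        rw [show (p ++ ['(']).length + m.length - (p ++ ['(']).length = m.length from by omega]
        exact List.take_left' rfl
      have hsl2 : PySem.List.slice (p ++ '(' :: m ++ ')' :: s) none
          (some ((p.length : Int) + 1)) = p ++ ['('] := by
        have h1 : ((p.length : Int) + 1) = ((p.length + 1 : Nat) : Int) := by push_cast; ring
        rw [h1, PySem.List.slice_to_natCast]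
        rw [show p ++ '(' :: m ++ ')' :: s = (p ++ ['(']) ++ (m ++ ')' :: s) from by simp]
        rw [show p.length + 1 = (p ++ ['(']).length from by simp]
        exact List.take_left
      have hsl3 : PySem.List.slice (p ++ '(' :: m ++ ')' :: s) none
          (some ((p.length : Int))) = p := by
        rw [PySem.List.slice_to_natCast,
          show p ++ '(' :: m ++ ')' :: s = p ++ ('(' :: m ++ ')' :: s) from by simp]
        exact List.take_left
      have hsl4 : PySem.List.slice (p ++ '(' :: m ++ ')' :: s)
          (some ((p.length : Int) + m.length + 1 + 1)) none = s := by
        have h1 : ((p.length : Int) + ↑m.length + 1 + 1) = ((p.length + m.length + 2 : Nat) : Int) := by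
          push_cast; ring
        rw [h1, PySem.List.slice_from_natCast]
        rw [show p ++ '(' :: m ++ ')' :: s = (p ++ '(' :: m ++ [')']) ++ s from by simp]
        rw [show p.length + m.length + 2 = (p ++ '(' :: m ++ [')']).length from by simp; omega]
        exact List.drop_left
      refine ⟨Ss.foldl (fun r s1 =>
          (Sm.foldl (fun r1 t =>
            PySem.Set.add (PySem.Set.add r1 ((p ++ ['(']) ++ t ++ [')'])) (p ++ t))
            PySem.Set.empty).foldl (fun r s2 => PySem.Set.add r (s2 ++ s1)) r)
          PySem.Set.empty, ?_, ?_, ?_⟩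
      · -- gA evaluates to exactly this set
        have hne : ((p.length : Int) ≠ -1) := by omega
        have hgt : ((p.length : Int) + m.length + 1 > (p.length : Int)) := by omega
        simp only [gA, hfind, hne, hloop, if_true, not_false_iff, ne_eq, hgt, and_self,
          hsl1, hgm, hsl2, hsl3, hsl4, hgs]
      · exact nodup_foldl_foldl_add _ _ _ _ List.nodup_nil
      · -- same members as B's set
        -- evaluate B's stack on p ++ '(' :: m ++ ')' :: s
        obtain ⟨P0, hP0eq, hP0se⟩ := forall2_singleton (foldp_lit hp unitS)
        have e1 : (p ++ '(' :: m ++ ')' :: s).foldl stepB [unitS]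
            = (')' :: s).foldl stepB (m.foldl stepB [unitS, P0]) := by
          simp only [List.foldl_append, List.foldl_cons, hP0eq, stepB_open]
        obtain ⟨A, st1, hA1, htl, hEq⟩ := List.forall₂_cons_right_iff.mp (SLm hm unitS [P0])
        obtain ⟨B, st2, hA2, htl2, hEq2⟩ := List.forall₂_cons_right_iff.mp htl
        have hnil : st2 = [] := by cases htl2; rfl
        rw [hnil] at hEq2; rw [hEq2] at hEq
        obtain ⟨Z, hZeq, hZse⟩ := forall2_singleton (SLb hs (frameWrap B A))
        have hBcu : Bcore (p ++ '(' :: m ++ ')' :: s) = Z := by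
          unfold Bcore
          rw [e1, hEq, List.foldl_cons, stepB_close, hZeq]; rfl
        have hBmem : ∀ y, y ∈ B ↔ y = p := fun y =>
          ((hA2 y).trans ((hP0se y).trans
            ((SE_unit_combSet _ y).trans (mem_singleton_set p y))))
        have hAmem : ∀ y, y ∈ A ↔ y ∈ Bcore m := fun y => (hA1 y).trans (SE_unit_combSet _ y)
        intro y
        rw [hBcu, hZse y, mem_combSet]
        rw [mem_foldl_foldl_add]
        simp only [PySem.Set.empty, List.not_mem_nil, false_or]
        constructor
        · rintro ⟨s1, hs1, s2, hs2, rfl⟩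
          rw [mem_foldl_add2] at hs2
          simp only [PySem.Set.empty, List.not_mem_nil, false_or] at hs2
          obtain ⟨t, ht, hw⟩ := hs2
          refine ⟨s2, ?_, s1, (hEs s1).mp hs1, rfl⟩
          rw [mem_frameWrap]
          exact ⟨p, (hBmem p).mpr rfl, t, (hAmem t).mpr ((hEm t).mp ht),
            by rcases hw with hw | hw <;> [left; right] <;> simp [hw]⟩
        · rintro ⟨w, hw, x, hx, rfl⟩
          obtain ⟨q, hq, t, ht, hqt⟩ := (mem_frameWrap w).mp hw
          have hq' : q = p := (hBmem q).mp hq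
          subst hq'
          refine ⟨x, (hEs x).mpr hx, w, ?_, rfl⟩
          rw [mem_foldl_add2]
          simp only [PySem.Set.empty, List.not_mem_nil, false_or]
          exact ⟨t, (hEm t).mpr ((hAmem t).mp ht),
            by rcases hqt with hqt | hqt <;> [left; right] <;> simp [hqt]⟩
    · have hfind : PySem.Chars.find u ['('] = -1 := find_no hmem
      refine ⟨PySem.Set.add PySem.Set.empty u, ?_, PySem.Set.nodup_add _ _ List.nodup_nil, ?_⟩
      · simp only [gA, hfind]
        norm_num [loopA_zero]
      · intro y
        rw [PySem.Set.mem_add, Bcore_noparen hmem y, mem_singleton_set]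
        simp [PySem.Set.empty]

-- ===== VERDICT (by name: the statement is the Claim_ definition above) =====
theorem f_spec : Claim_equal_f := by
  intro inp _ hpre
  unfold Spec_f
  have hb : Bal inp.toList := balOfScan inp.toList hpre
  obtain ⟨S, hgA, hN, hSE⟩ := ML (inp.toList.length + 1) inp.toList hb (by omega)
  show f inp = f_alt inp
  unfold f f_alt
  rw [hgA]
  apply PySem.List.sorted_eq_sorted_of_perm
  · intro a b h; exact h
  · apply List.Perm.map
    refine (List.perm_ext_iff_of_nodup (PySem.Set.nodup_diff _ _ hN)
      (PySem.Set.nodup_diff _ _ (nodup_Bcore inp.toList))).mpr ?_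
    intro x
    rw [PySem.Set.mem_diff, PySem.Set.mem_diff, hSE x]
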